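-- pv_equiv track=rewrite | github.com/djotaku/adventofcode | 2015/Day_01/Python/part_2.py | parse_floor_directions
-- ===== SOURCE A (Python) =====
-- def parse_floor_directions(instructions: str) -> int:
--     """Take a series of parenthesis and figure out what floor that leaves Santa at."""
--     floor = 0
--     for position, parenthesis in enumerate(instructions, start=1):
--         if parenthesis == "(":
--             floor += 1
--         elif parenthesis == ")":
--             floor -= 1
--         if floor == -1:
--             return position
-- ===== SOURCE B (Python) =====
-- def parse_floor_directions(instructions: str) -> int:
--     """Transform-then-search: map chars to deltas, build prefix sums, find first -1."""
--     deltas = [1 if c == "(" else (-1 if c == ")" else 0) for c in instructions]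
--     sums = []
--     total = 0
--     for d in deltas:
--         total += d
--         sums.append(total)
--     return next((i for i, s in enumerate(sums, 1) if s == -1), None)
-- ===== Notes on version B (the rewrite author's own statement) =====
-- stated objective: idiomatic
-- what changed: Replaced the single fused loop with inline branching and early return by a three-stage pipeline: map characters to deltas, build the prefix-sum list, then search it for the first -1 with next/enumerate.
import Mathlib
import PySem

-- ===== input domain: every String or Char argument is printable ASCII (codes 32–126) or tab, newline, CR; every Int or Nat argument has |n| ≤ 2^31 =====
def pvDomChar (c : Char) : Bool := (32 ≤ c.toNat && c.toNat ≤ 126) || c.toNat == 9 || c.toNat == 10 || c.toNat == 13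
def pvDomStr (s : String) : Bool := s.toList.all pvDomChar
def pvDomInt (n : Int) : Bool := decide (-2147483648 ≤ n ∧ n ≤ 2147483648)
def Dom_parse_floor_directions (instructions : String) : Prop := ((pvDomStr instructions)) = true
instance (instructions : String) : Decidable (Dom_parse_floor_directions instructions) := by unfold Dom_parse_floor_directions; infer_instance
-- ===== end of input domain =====

-- B replaces A's fused loop-with-early-return by a map/prefix-sums/search pipeline (idiomatic, same cost).


-- ===== PORT A =====
-- the for-loop of A: position counter, running floor, early return when floor hits -1
def pvGoA : List Char → Int → Int → Option Int
  | [], _, _ => none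
  | c :: rest, pos, floor =>
    let floor' := if c = '(' then floor + 1 else if c = ')' then floor - 1 else floor
    if floor' = -1 then some pos else pvGoA rest (pos + 1) floor'

def parse_floor_directions (instructions : String) : Option Int :=
  pvGoA instructions.toList 1 0

-- ===== PORT B =====
-- stage 1: deltas
def pvDelta (c : Char) : Int := if c = '(' then 1 else if c = ')' then -1 else 0
-- stage 2: prefix sums (the accumulator loop of Source B)
def pvPrefixSums : List Int → Int → List Int
  | [], _ => []
  | d :: rest, total => (total + d) :: pvPrefixSums rest (total + d)
-- stage 3: first 1-indexed position whose prefix sum is -1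
def pvFindNeg1 : List Int → Int → Option Int
  | [], _ => none
  | s :: rest, pos => if s = -1 then some pos else pvFindNeg1 rest (pos + 1)

def parse_floor_directions_alt (instructions : String) : Option Int :=
  pvFindNeg1 (pvPrefixSums (instructions.toList.map pvDelta) 0) 1

-- ===== PRECONDITION & SPEC =====
def Spec_parse_floor_directions (instructions : String) (out : Option Int) : Prop := out = parse_floor_directions_alt instructions
instance (instructions : String) (out : Option Int) : Decidable (Spec_parse_floor_directions instructions out) := by unfold Spec_parse_floor_directions; infer_instance

-- ===== CLAIM (what is proved, stated in full; the proofs are below) =====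
def Claim_equal_parse_floor_directions : Prop := ∀ (instructions : String), Dom_parse_floor_directions instructions → Spec_parse_floor_directions instructions (parse_floor_directions instructions)

-- ===== LEMMAS AND PROOFS =====
theorem pvGoA_eq_pipeline : ∀ (l : List Char) (pos floor : Int),
    pvGoA l pos floor = pvFindNeg1 (pvPrefixSums (l.map pvDelta) floor) pos := by
  intro l
  induction l with
  | nil => intro pos floor; rfl
  | cons c rest ih =>
    intro pos floor
    simp only [pvGoA, List.map, pvPrefixSums, pvFindNeg1, pvDelta]
    have hstep : (if c = '(' then floor + 1 else if c = ')' then floor - 1 else floor)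
        = floor + (if c = '(' then 1 else if c = ')' then -1 else 0) := by
      split_ifs <;> ring
    rw [hstep, ih]

-- ===== VERDICT (by name: the statement is the Claim_ definition above) =====
theorem parse_floor_directions_spec : Claim_equal_parse_floor_directions := by
  intro s _
  unfold Spec_parse_floor_directions parse_floor_directions parse_floor_directions_alt
  exact pvGoA_eq_pipeline s.toList 1 0
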